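-- pv_equiv track=rewrite | github.com/katalystinteractive/agentic-trading | tools/market_context_pre_analyst.py | build_portfolio_sectors
-- ===== SOURCE A (Python) =====
-- def build_portfolio_sectors(gated_orders):
--     """Group pending BUY order tickers by sector.
--
--     Returns dict[sector_name, list[ticker]] (unique tickers per sector).
--     """
--     sector_tickers = {}
--     for o in gated_orders:
--         sector = o.get("sector", "Unknown")
--         ticker = o["ticker"]
--         if sector not in sector_tickers:
--             sector_tickers[sector] = set()
--         sector_tickers[sector].add(ticker)
--     # Convert sets to sorted lists
--     return {s: sorted(list(t)) for s, t in sector_tickers.items()}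
-- ===== SOURCE B (Python) =====
-- def build_portfolio_sectors(gated_orders):
--     """Group pending BUY order tickers by sector (unique, sorted per sector)."""
--     pairs = [(o.get("sector", "Unknown"), o["ticker"]) for o in gated_orders]
--     return {s: sorted({t for s2, t in pairs if s2 == s}) for s, _ in pairs}
-- ===== Notes on version B (the rewrite author's own statement) =====
-- stated objective: simpler
-- what changed: Replaces the imperative dict-of-sets bucketing loop plus a second sets-to-sorted-lists pass with a flat (sector, ticker) pair list and a single dict comprehension that builds each sector's sorted de-duplicated ticker list by a per-sector scan of the pairs.
import Mathlib
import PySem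

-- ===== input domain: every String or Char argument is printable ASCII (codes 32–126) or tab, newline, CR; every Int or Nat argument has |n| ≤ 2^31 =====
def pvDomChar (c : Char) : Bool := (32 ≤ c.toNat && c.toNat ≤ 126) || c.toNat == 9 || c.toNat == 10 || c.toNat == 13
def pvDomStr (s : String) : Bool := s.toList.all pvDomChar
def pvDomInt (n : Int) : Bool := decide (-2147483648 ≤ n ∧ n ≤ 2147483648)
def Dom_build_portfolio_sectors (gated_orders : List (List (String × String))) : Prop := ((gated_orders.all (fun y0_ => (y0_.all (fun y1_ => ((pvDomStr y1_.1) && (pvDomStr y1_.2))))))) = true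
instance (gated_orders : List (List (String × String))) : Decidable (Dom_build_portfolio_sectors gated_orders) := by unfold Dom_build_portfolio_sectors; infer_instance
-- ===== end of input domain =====

-- B replaces A's dict-of-sets bucketing + second conversion pass with a flat pair list
-- and a single dict comprehension (per-sector scan); simpler, same return value.

-- ===== PORT A =====
def build_portfolio_sectors (gated_orders : List (List (String × String))) : List (String × List String) :=
  let st := gated_orders.foldl (fun st o =>
    let sector := (PySem.Dict.mk o).getD "sector" "Unknown"
    -- o["ticker"]: total form of the raising lookup; exact under Pre_ (every order has a "ticker" key)
    let ticker := ((PySem.Dict.mk o).get? "ticker").getD ""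
    let st := if st.contains sector then st else st.insert sector PySem.Set.empty
    st.modify sector PySem.Set.empty (fun ts => PySem.Set.add ts ticker)) PySem.Dict.empty
  st.items.map (fun p => (p.1, PySem.List.sorted p.2 (fun x => x) false))

-- ===== PORT B =====
def build_portfolio_sectors_alt (gated_orders : List (List (String × String))) : List (String × List String) :=
  let pairs := gated_orders.map (fun o =>
    ((PySem.Dict.mk o).getD "sector" "Unknown",
     -- o["ticker"]: total form of the raising lookup; exact under Pre_
     ((PySem.Dict.mk o).get? "ticker").getD ""))
  (pairs.foldl (fun d p =>
    d.insert p.1 (PySem.List.sorted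
      (PySem.Set.ofList ((pairs.filter (fun q => q.1 == p.1)).map Prod.snd)) (fun x => x) false))
    PySem.Dict.empty).items

-- ===== PRECONDITION & SPEC =====
-- Pre_ excludes exactly the orders without a "ticker" key, on which Python A raises KeyError.
def Pre_build_portfolio_sectors (gated_orders : List (List (String × String))) : Prop :=
  (gated_orders.all (fun o => o.any (fun kv => kv.1 == "ticker"))) = true
instance (gated_orders : List (List (String × String))) : Decidable (Pre_build_portfolio_sectors gated_orders) := by unfold Pre_build_portfolio_sectors; infer_instance
def pvWitness_build_portfolio_sectors : (List (List (String × String))) :=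
  [[("ticker", "AAPL"), ("sector", "Tech")], [("ticker", "XOM")]]
def Spec_build_portfolio_sectors (gated_orders : List (List (String × String))) (out : List (String × List String)) : Prop := out = build_portfolio_sectors_alt gated_orders
instance (gated_orders : List (List (String × String))) (out : List (String × List String)) : Decidable (Spec_build_portfolio_sectors gated_orders out) := by unfold Spec_build_portfolio_sectors; infer_instance

-- ===== CLAIM (what is proved, stated in full; the proofs are below) =====
def Claim_equal_build_portfolio_sectors : Prop := ∀ (gated_orders : List (List (String × String))), Dom_build_portfolio_sectors gated_orders → Pre_build_portfolio_sectors gated_orders → Spec_build_portfolio_sectors gated_orders (build_portfolio_sectors gated_orders)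

-- ===== LEMMAS AND PROOFS =====

-- A's "if absent, insert empty set, then add" step equals a single modify.
theorem modify_step (d : PySem.Dict String (PySem.Set String)) (s t : String) :
    (if d.contains s then d else d.insert s PySem.Set.empty).modify s PySem.Set.empty
      (fun ts => PySem.Set.add ts t)
    = d.modify s PySem.Set.empty (fun ts => PySem.Set.add ts t) := by
  by_cases h : d.contains s
  · simp [h]
  · simp only [h, if_neg, Bool.not_eq_true, PySem.Dict.modify, PySem.Dict.insert_insert_self,
      PySem.Dict.getD_insert_self]
    rw [PySem.Dict.getD_of_not_contains _ _ (by simpa using h)]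

theorem getD_modify_fold (l : List (String × String))
    (d : PySem.Dict String (PySem.Set String)) (c : String) :
    (l.foldl (fun d p => d.modify p.1 PySem.Set.empty (fun ts => PySem.Set.add ts p.2)) d).getD c
        PySem.Set.empty
    = PySem.Set.update (d.getD c PySem.Set.empty) ((l.filter (fun q => q.1 == c)).map Prod.snd) := by
  induction l generalizing d with
  | nil => simp [PySem.Set.update]
  | cons p l ih =>
    simp only [List.foldl_cons, ih, PySem.Dict.getD_modify]
    by_cases h : p.1 = c
    · simp [h, PySem.Set.update]
    · simp [h, Ne.symm h]

theorem getD_insert_fold {ν : Type} (l : List (String × String)) (g : String → ν)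
    (d : PySem.Dict String ν) (c : String) (dflt : ν) :
    (l.foldl (fun d p => d.insert p.1 (g p.1)) d).getD c dflt
    = if c ∈ l.map Prod.fst then g c else d.getD c dflt := by
  induction l generalizing d with
  | nil => simp
  | cons p l ih =>
    simp only [List.foldl_cons, ih, PySem.Dict.getD_insert]
    by_cases h : c ∈ l.map Prod.fst
    · simp [h]
    · by_cases h2 : c = p.1 <;> simp [h, h2]

theorem set_update_nil (xs : List String) :
    PySem.Set.update ([] : PySem.Set String) xs = PySem.Set.ofList xs := by
  rw [PySem.Set.ofList_eq_foldl]; rfl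

theorem set_update_empty (xs : List String) :
    PySem.Set.update PySem.Set.empty xs = PySem.Set.ofList xs := set_update_nil xs

set_option maxHeartbeats 2000000 in
theorem build_portfolio_sectors_spec_aux (gated_orders : List (List (String × String))) :
    build_portfolio_sectors gated_orders = build_portfolio_sectors_alt gated_orders := by
  unfold build_portfolio_sectors build_portfolio_sectors_alt
  dsimp only
  set pairs : List (String × String) := gated_orders.map (fun o =>
    ((PySem.Dict.mk o).getD "sector" "Unknown",
     ((PySem.Dict.mk o).get? "ticker").getD "")) with hpairs
  -- A's loop over orders is the modify-loop over the pair list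
  have hA : (gated_orders.foldl (fun st o =>
      let sector := (PySem.Dict.mk o).getD "sector" "Unknown"
      let ticker := ((PySem.Dict.mk o).get? "ticker").getD ""
      let st := if st.contains sector then st else st.insert sector PySem.Set.empty
      st.modify sector PySem.Set.empty (fun ts => PySem.Set.add ts ticker)) PySem.Dict.empty)
      = pairs.foldl (fun d p => d.modify p.1 PySem.Set.empty (fun ts => PySem.Set.add ts p.2))
          PySem.Dict.empty := by
    rw [hpairs, List.foldl_map]
    exact PySem.List.foldl_congr_mem _ _ _ _ (fun d o _ => modify_step d _ _)
  rw [hA]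
  -- keys of both dicts: the distinct sectors, in first-appearance order; and they are Nodup
  have hndA : (pairs.foldl (fun d p => d.modify p.1 PySem.Set.empty
        (fun ts => PySem.Set.add ts p.2)) PySem.Dict.empty).keys.Nodup :=
    PySem.Dict.nodup_keys_foldl_modify_key pairs Prod.fst PySem.Set.empty
      (fun _ p => fun ts => PySem.Set.add ts p.2) PySem.Dict.empty (by simp)
  have hndB : (pairs.foldl (fun d p => d.insert p.1 (PySem.List.sorted
        (PySem.Set.ofList ((pairs.filter (fun q => q.1 == p.1)).map Prod.snd)) (fun x => x) false))
        PySem.Dict.empty).keys.Nodup :=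
    PySem.Dict.nodup_keys_foldl_insert_key pairs Prod.fst
      (fun _ p => PySem.List.sorted
        (PySem.Set.ofList ((pairs.filter (fun q => q.1 == p.1)).map Prod.snd)) (fun x => x) false)
      PySem.Dict.empty (by simp)
  rw [PySem.Dict.items_eq_map_keys _ hndA PySem.Set.empty,
      PySem.Dict.items_eq_map_keys _ hndB [], List.map_map]
  have hkA : (pairs.foldl (fun d p => d.modify p.1 PySem.Set.empty
        (fun ts => PySem.Set.add ts p.2)) PySem.Dict.empty).keys
      = PySem.Set.ofList (pairs.map Prod.fst) := by
    rw [PySem.Dict.keys_foldl_modify_key, PySem.Dict.keys_empty, set_update_nil]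
  have hkB : (pairs.foldl (fun d p => d.insert p.1 (PySem.List.sorted
        (PySem.Set.ofList ((pairs.filter (fun q => q.1 == p.1)).map Prod.snd)) (fun x => x) false))
        PySem.Dict.empty).keys
      = PySem.Set.ofList (pairs.map Prod.fst) := by
    rw [PySem.Dict.keys_foldl_insert_key, PySem.Dict.keys_empty, set_update_nil]
  rw [hkA, hkB]
  refine List.map_congr_left (fun s hs => ?_)
  have hsmem : s ∈ pairs.map Prod.fst := (PySem.Set.mem_ofList _ _).mp hs
  rw [getD_insert_fold pairs (fun s => PySem.List.sorted
      (PySem.Set.ofList ((pairs.filter (fun q => q.1 == s)).map Prod.snd)) (fun x => x) false),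
    if_pos hsmem]
  simp only [Function.comp, getD_modify_fold, PySem.Dict.getD_empty, set_update_empty]

-- ===== VERDICT (by name: the statement is the Claim_ definition above) =====
theorem build_portfolio_sectors_spec : Claim_equal_build_portfolio_sectors := by
  intro go _ _
  exact build_portfolio_sectors_spec_aux go
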